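-- pv_equiv track=rewrite | github.com/nOOne-is-hier/TIS | SWEA/22576.근의_공식/22576.근의_공식5.py | solve_quadratic_mod2k
-- ===== SOURCE A (Python) =====
-- def safe_mod(a, m):
--     try:
--         return a % m
--     except ZeroDivisionError:
--         return -1
--
-- def solve_quadratic_mod2k(a, b, c, k):
--     if k <= 0:
--         return -1
--     if k == 1:
--         return 0 if c % 2 == 0 else -1
--
--     if a % 2 == b % 2 == 0:
--         if c % 2 == 1:
--             return -1
--         x = solve_quadratic_mod2k(a // 2, b // 2, c // 2, k - 1)
--         return -1 if x == -1 else safe_mod(x * 2, 1 << k)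
--
--     if a % 2 == 0:
--         if b % 2 == 0:
--             return -1
--         try:
--             return safe_mod(-c * pow(b, -1, 1 << k), 1 << k)
--         except ValueError:
--             return -1
--
--     x = 0
--     for i in range(k):
--         try:
--             px = safe_mod(a * x * x + b * x + c, 1 << (i + 1))
--             if px != 0 and safe_mod(a * 2 * x + b, 2) == 1:
--                 x = safe_mod(x + (1 << i), 1 << k)
--         except OverflowError:
--             return -1
--     return x
-- ===== SOURCE B (Python) =====
-- def solve_quadratic_mod2k(a, b, c, k):
--     if k <= 0:
--         return -1
--     K = k
--     t = 0
--     # strip common factors of 2 iteratively instead of recursing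
--     while k > 1 and a % 2 == 0 and b % 2 == 0:
--         if c % 2 != 0:
--             return -1
--         a //= 2
--         b //= 2
--         c //= 2
--         k -= 1
--         t += 1
--     if k == 1:
--         return 0 if c % 2 == 0 else -1
--     if a % 2 == 0:
--         x = (-c * pow(b, -1, 1 << k)) % (1 << k)
--     else:
--         odd_b = b % 2
--         x = 0
--         for i in range(k):
--             if (a * x * x + b * x + c) % (1 << (i + 1)) != 0 and odd_b == 1:
--                 x += 1 << i
--     return (x << t) % (1 << K)
-- ===== Notes on version B (the rewrite author's own statement) =====
-- stated objective: alternative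
-- what changed: The recursive both-even branch is replaced by an iterative stripping loop that halves a,b,c while counting t, runs the linear/Hensel core once on the reduced coefficients, and scales the root by 2^t mod 2^K at the end; safe_mod guards and the x re-reduction inside the lifting loop are dropped (the divisors are never 0 and the bits are disjoint), and the constant derivative parity b%2 is hoisted out of the loop.
import Mathlib
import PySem

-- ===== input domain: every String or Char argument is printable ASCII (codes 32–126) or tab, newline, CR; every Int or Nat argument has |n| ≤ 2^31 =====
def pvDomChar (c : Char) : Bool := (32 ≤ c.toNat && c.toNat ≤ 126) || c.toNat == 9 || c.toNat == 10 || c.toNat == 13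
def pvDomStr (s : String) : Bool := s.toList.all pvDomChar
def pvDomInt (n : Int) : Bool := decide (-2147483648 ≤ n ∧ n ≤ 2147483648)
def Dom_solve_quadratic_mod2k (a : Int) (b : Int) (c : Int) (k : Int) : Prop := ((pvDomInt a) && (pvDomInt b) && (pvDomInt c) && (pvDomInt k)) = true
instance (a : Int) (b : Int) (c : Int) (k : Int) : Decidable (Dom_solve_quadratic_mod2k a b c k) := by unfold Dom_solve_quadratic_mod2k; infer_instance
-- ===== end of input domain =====

-- B replaces A's recursive both-even branch by an iterative strip-and-rescale loop (same cost; objective: alternative decomposition).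

-- ===== PORT A =====
-- safe_mod: 'a % m' with ZeroDivisionError mapped to -1
def safe_mod (a m : Int) : Int := if m = 0 then -1 else PySem.Int.mod a m

-- extended Euclid on Nat (used only to port the builtin pow(b, -1, m))
def egcdN (a b : Nat) : Nat × Int × Int :=
  if h : b = 0 then (a, 1, 0)
  else
    let r := egcdN b (a % b)
    (r.1, r.2.2, r.2.1 - ((a / b : Nat) : Int) * r.2.2)
termination_by b
decreasing_by exact Nat.mod_lt _ (Nat.pos_of_ne_zero h)

-- port of the builtin pow(b, -1, m) for m > 0: the unique inverse of b in [0, m)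
-- (ValueError, i.e. gcd ≠ 1, is represented by -1; unreachable on the calls both ports make)
def pyPowInvMod (b m : Int) : Int :=
  let r := egcdN (PySem.Int.mod b m).toNat m.toNat
  if r.1 = 1 then PySem.Int.mod r.2.1 m else -1

-- 1 << k is ported as 2 ^ k.toNat (k ≥ 0 wherever it is evaluated)
def solve_quadratic_mod2k (a : Int) (b : Int) (c : Int) (k : Int) : Int :=
  if _h0 : k ≤ 0 then -1
  else if _h1 : k = 1 then (if PySem.Int.mod c 2 = 0 then 0 else -1)
  else if PySem.Int.mod a 2 = PySem.Int.mod b 2 ∧ PySem.Int.mod b 2 = 0 then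
    if PySem.Int.mod c 2 = 1 then -1
    else
      let x := solve_quadratic_mod2k (PySem.Int.floordiv a 2) (PySem.Int.floordiv b 2)
                 (PySem.Int.floordiv c 2) (k - 1)
      if x = -1 then -1 else safe_mod (x * 2) (2 ^ k.toNat)
  else if PySem.Int.mod a 2 = 0 then
    if PySem.Int.mod b 2 = 0 then -1
    else safe_mod (-c * pyPowInvMod b (2 ^ k.toNat)) (2 ^ k.toNat)
  else
    (PySem.List.pyRange 0 k 1).foldl (fun x i =>
      let px := safe_mod (a * x * x + b * x + c) (2 ^ (i + 1).toNat)
      if px ≠ 0 ∧ safe_mod (a * 2 * x + b) 2 = 1 then safe_mod (x + 2 ^ i.toNat) (2 ^ k.toNat)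
      else x) 0
termination_by k.toNat
decreasing_by simp_wf; omega

-- ===== PORT B =====
-- the while loop of Source B (strip factors of 2), followed by the core solve and the final rescale
def sqAltLoop (a b c k t K : Int) : Int :=
  if _h : 1 < k ∧ PySem.Int.mod a 2 = 0 ∧ PySem.Int.mod b 2 = 0 then
    if PySem.Int.mod c 2 ≠ 0 then -1
    else sqAltLoop (PySem.Int.floordiv a 2) (PySem.Int.floordiv b 2) (PySem.Int.floordiv c 2)
           (k - 1) (t + 1) K
  else if k = 1 then (if PySem.Int.mod c 2 = 0 then 0 else -1)
  else
    let x :=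
      if PySem.Int.mod a 2 = 0 then
        PySem.Int.mod (-c * pyPowInvMod b (2 ^ k.toNat)) (2 ^ k.toNat)
      else
        let odd_b := PySem.Int.mod b 2
        (PySem.List.pyRange 0 k 1).foldl (fun x i =>
          if PySem.Int.mod (a * x * x + b * x + c) (2 ^ (i + 1).toNat) ≠ 0 ∧ odd_b = 1 then
            x + 2 ^ i.toNat
          else x) 0
    PySem.Int.mod (x * 2 ^ t.toNat) (2 ^ K.toNat)
termination_by k.toNat
decreasing_by simp_wf; omega

def solve_quadratic_mod2k_alt (a : Int) (b : Int) (c : Int) (k : Int) : Int :=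
  if k ≤ 0 then -1 else sqAltLoop a b c k 0 k

-- ===== PRECONDITION & SPEC =====
def Spec_solve_quadratic_mod2k (a : Int) (b : Int) (c : Int) (k : Int) (out : Int) : Prop := out = solve_quadratic_mod2k_alt a b c k
instance (a : Int) (b : Int) (c : Int) (k : Int) (out : Int) : Decidable (Spec_solve_quadratic_mod2k a b c k out) := by unfold Spec_solve_quadratic_mod2k; infer_instance

-- ===== CLAIM (what is proved, stated in full; the proofs are below) =====
def Claim_equal_solve_quadratic_mod2k : Prop := ∀ (a : Int) (b : Int) (c : Int) (k : Int), Dom_solve_quadratic_mod2k a b c k → Spec_solve_quadratic_mod2k a b c k (solve_quadratic_mod2k a b c k)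

-- ===== LEMMAS AND PROOFS =====

-- PySem.Int.mod with a positive divisor is emod
theorem pv_mod_pos (x m : Int) (hm : 0 < m) : PySem.Int.mod x m = x % m :=
  PySem.Int.mod_eq_emod_of_pos hm

theorem pv_mod_bounds (x m : Int) (hm : 0 < m) :
    0 ≤ PySem.Int.mod x m ∧ PySem.Int.mod x m < m := by
  rw [pv_mod_pos x m hm]
  exact ⟨Int.emod_nonneg _ hm.ne', Int.emod_lt_of_pos _ hm⟩

theorem pv_safe_pos (x m : Int) (hm : 0 < m) : safe_mod x m = PySem.Int.mod x m := by
  rw [safe_mod, if_neg hm.ne']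

-- a % 2 of an int is 0 or 1 under Python semantics
theorem pv_mod_two_cases (x : Int) : PySem.Int.mod x 2 = 0 ∨ PySem.Int.mod x 2 = 1 := by
  rw [pv_mod_pos x 2 (by norm_num)]; omega

-- zeta-reduction helpers for the `let` bindings the ports contain (definitional)
theorem pv_zetaA (e m : Int) :
    (have x := e; if x = -1 then (-1 : Int) else safe_mod (x * 2) m)
      = if e = -1 then -1 else safe_mod (e * 2) m := rfl

theorem pv_zetaB (e t K : Int) :
    (have x := e; PySem.Int.mod (x * 2 ^ t.toNat) (2 ^ K.toNat))
      = PySem.Int.mod (e * 2 ^ t.toNat) (2 ^ K.toNat) := rfl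

theorem pv_zetaC (a b c k : Int) :
    (have odd_b := PySem.Int.mod b 2;
      (PySem.List.pyRange 0 k 1).foldl (fun x i =>
        if PySem.Int.mod (a * x * x + b * x + c) (2 ^ (i + 1).toNat) ≠ 0 ∧ odd_b = 1 then
          x + 2 ^ i.toNat
        else x) 0)
      = (PySem.List.pyRange 0 k 1).foldl (fun x i =>
          if PySem.Int.mod (a * x * x + b * x + c) (2 ^ (i + 1).toNat) ≠ 0 ∧ PySem.Int.mod b 2 = 1 then
            x + 2 ^ i.toNat
          else x) 0 := rfl

-- the odd-a lifting loops of the two ports agree and the A-loop value stays in [0, 2^n)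
theorem pv_fold (a b c k : Int) :
    ∀ n : Nat, n ≤ k.toNat →
    ((PySem.List.pyRange 0 (n : Int) 1).foldl (fun x i =>
        let px := safe_mod (a * x * x + b * x + c) (2 ^ (i + 1).toNat)
        if px ≠ 0 ∧ safe_mod (a * 2 * x + b) 2 = 1 then safe_mod (x + 2 ^ i.toNat) (2 ^ k.toNat)
        else x) 0
      = (PySem.List.pyRange 0 (n : Int) 1).foldl (fun x i =>
          if PySem.Int.mod (a * x * x + b * x + c) (2 ^ (i + 1).toNat) ≠ 0 ∧ PySem.Int.mod b 2 = 1 then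
            x + 2 ^ i.toNat
          else x) 0)
    ∧ 0 ≤ (PySem.List.pyRange 0 (n : Int) 1).foldl (fun x i =>
        let px := safe_mod (a * x * x + b * x + c) (2 ^ (i + 1).toNat)
        if px ≠ 0 ∧ safe_mod (a * 2 * x + b) 2 = 1 then safe_mod (x + 2 ^ i.toNat) (2 ^ k.toNat)
        else x) 0
    ∧ (PySem.List.pyRange 0 (n : Int) 1).foldl (fun x i =>
        let px := safe_mod (a * x * x + b * x + c) (2 ^ (i + 1).toNat)
        if px ≠ 0 ∧ safe_mod (a * 2 * x + b) 2 = 1 then safe_mod (x + 2 ^ i.toNat) (2 ^ k.toNat)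
        else x) 0 < 2 ^ n := by
  intro n
  induction n with
  | zero =>
    intro _
    rw [PySem.List.pyRange_one_eq_nil (by norm_num)]
    simp
  | succ n ih =>
    intro hn
    obtain ⟨heq, h0, hlt⟩ := ih (by omega)
    have hsplit : PySem.List.pyRange 0 ((n + 1 : Nat) : Int) 1
        = PySem.List.pyRange 0 ((n : Nat) : Int) 1 ++ [((n : Nat) : Int)] := by
      have h : ((n + 1 : Nat) : Int) = ((n : Nat) : Int) + 1 := by push_cast; ring
      rw [h, PySem.List.pyRange_one_succ_right (by positivity)]
    rw [hsplit, List.foldl_append, List.foldl_append]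
    rw [← heq]
    set x := (PySem.List.pyRange 0 ((n : Nat) : Int) 1).foldl (fun x i =>
        let px := safe_mod (a * x * x + b * x + c) (2 ^ (i + 1).toNat)
        if px ≠ 0 ∧ safe_mod (a * 2 * x + b) 2 = 1 then safe_mod (x + 2 ^ i.toNat) (2 ^ k.toNat)
        else x) 0 with hx
    have htn' : (((n : Nat) : Int)).toNat = n := by omega
    have hguard : safe_mod (a * 2 * x + b) 2 = PySem.Int.mod b 2 := by
      rw [pv_safe_pos _ 2 (by norm_num), pv_mod_pos _ 2 (by norm_num),
          pv_mod_pos _ 2 (by norm_num)]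
      have h : a * 2 * x + b = b + 2 * (a * x) := by ring
      rw [h, Int.add_mul_emod_self_left]
    have hpx : safe_mod (a * x * x + b * x + c) (2 ^ (((n : Nat) : Int) + 1).toNat)
        = PySem.Int.mod (a * x * x + b * x + c) (2 ^ (((n : Nat) : Int) + 1).toNat) :=
      pv_safe_pos _ _ (by positivity)
    have hupd : safe_mod (x + 2 ^ n) (2 ^ k.toNat)
        = x + 2 ^ n := by
      rw [pv_safe_pos _ _ (by positivity), pv_mod_pos _ _ (by positivity)]
      apply Int.emod_eq_of_lt (by positivity)
      have h1 : x + 2 ^ n < 2 ^ (n + 1) := by rw [pow_succ]; omega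
      have h2 : (2 : Int) ^ (n + 1) ≤ 2 ^ k.toNat :=
        pow_le_pow_right₀ (by norm_num) (by omega)
      omega
    simp only [List.foldl_cons, List.foldl_nil, hguard, hpx, hupd, htn']
    refine ⟨by trivial, ?_⟩
    have hp : (0 : Int) < 2 ^ n := by positivity
    split_ifs
    · exact ⟨by omega, by rw [pow_succ]; omega⟩
    · exact ⟨h0, lt_of_lt_of_le hlt (pow_le_pow_right₀ (by norm_num) (by omega))⟩

-- every value A returns for k ≥ 1 is -1 or lies in [0, 2^k)
theorem pv_range (a b c k : Int) (hk : 1 ≤ k) :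
    solve_quadratic_mod2k a b c k = -1 ∨
      (0 ≤ solve_quadratic_mod2k a b c k ∧ solve_quadratic_mod2k a b c k < 2 ^ k.toNat) := by
  rw [solve_quadratic_mod2k, dif_neg (show ¬ k ≤ 0 by omega)]
  by_cases h1 : k = 1
  · rw [dif_pos h1]
    by_cases hc : PySem.Int.mod c 2 = 0
    · rw [if_pos hc]; right; exact ⟨le_rfl, by positivity⟩
    · rw [if_neg hc]; left; rfl
  · rw [dif_neg h1]
    by_cases hBE : PySem.Int.mod a 2 = PySem.Int.mod b 2 ∧ PySem.Int.mod b 2 = 0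
    · rw [if_pos hBE]
      by_cases hc : PySem.Int.mod c 2 = 1
      · rw [if_pos hc]; left; rfl
      · rw [if_neg hc, pv_zetaA]
        by_cases hx : solve_quadratic_mod2k (PySem.Int.floordiv a 2) (PySem.Int.floordiv b 2)
            (PySem.Int.floordiv c 2) (k - 1) = -1
        · rw [if_pos hx]; left; rfl
        · rw [if_neg hx, pv_safe_pos _ _ (by positivity)]
          right; exact pv_mod_bounds _ _ (by positivity)
    · rw [if_neg hBE]
      by_cases hae : PySem.Int.mod a 2 = 0
      · rw [if_pos hae]
        by_cases hbe : PySem.Int.mod b 2 = 0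
        · rw [if_pos hbe]; left; rfl
        · rw [if_neg hbe, pv_safe_pos _ _ (by positivity)]
          right; exact pv_mod_bounds _ _ (by positivity)
      · rw [if_neg hae]
        have hf := pv_fold a b c k k.toNat (le_refl _)
        rw [show ((k.toNat : Nat) : Int) = k by omega] at hf
        right; exact ⟨hf.2.1, hf.2.2⟩

-- B's strip loop computes A's recursion, rescaled by 2^t modulo 2^K
theorem pv_gen (n : Nat) : ∀ a b c k t K : Int, k.toNat = n → 1 ≤ k → 0 ≤ t → K = k + t →
    sqAltLoop a b c k t K =
      (if solve_quadratic_mod2k a b c k = -1 then -1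
       else PySem.Int.mod (solve_quadratic_mod2k a b c k * 2 ^ t.toNat) (2 ^ K.toNat)) := by
  induction n with
  | zero => intro a b c k t K hn hk _ _; omega
  | succ n ih =>
    intro a b c k t K hn hk ht hK
    by_cases hS : 1 < k ∧ PySem.Int.mod a 2 = 0 ∧ PySem.Int.mod b 2 = 0
    · -- strip step of B / both-even recursion of A
      have hcm : PySem.Int.mod a 2 = PySem.Int.mod b 2 ∧ PySem.Int.mod b 2 = 0 :=
        ⟨hS.2.1.trans hS.2.2.symm, hS.2.2⟩
      rcases pv_mod_two_cases c with hc | hc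
      · -- c even: one halving step on both sides, then the IH
        have hA : solve_quadratic_mod2k a b c k =
            (if solve_quadratic_mod2k (PySem.Int.floordiv a 2) (PySem.Int.floordiv b 2)
                (PySem.Int.floordiv c 2) (k - 1) = -1 then -1
             else safe_mod (solve_quadratic_mod2k (PySem.Int.floordiv a 2)
                (PySem.Int.floordiv b 2) (PySem.Int.floordiv c 2) (k - 1) * 2) (2 ^ k.toNat)) := by
          conv_lhs => rw [solve_quadratic_mod2k]
          rw [dif_neg (show ¬ k ≤ 0 by omega), dif_neg (show ¬ k = 1 by omega), if_pos hcm,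
              if_neg (show ¬ PySem.Int.mod c 2 = 1 by rw [hc]; norm_num), pv_zetaA]
        rw [hA]
        conv_lhs => rw [sqAltLoop]
        rw [dif_pos hS, if_neg (not_not_intro hc),
            ih (PySem.Int.floordiv a 2) (PySem.Int.floordiv b 2) (PySem.Int.floordiv c 2)
              (k - 1) (t + 1) K (by omega) (by omega) (by omega) (by omega)]
        set x := solve_quadratic_mod2k (PySem.Int.floordiv a 2) (PySem.Int.floordiv b 2)
            (PySem.Int.floordiv c 2) (k - 1) with hxdef
        by_cases hx : x = -1
        · rw [if_pos hx, if_pos (by rw [if_pos hx])]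
        · have hb := pv_range (PySem.Int.floordiv a 2) (PySem.Int.floordiv b 2)
              (PySem.Int.floordiv c 2) (k - 1) (by omega)
          rw [← hxdef] at hb
          rcases hb with hb | ⟨hb0, hblt⟩
          · exact absurd hb hx
          · have hval : safe_mod (x * 2) (2 ^ k.toNat) = x * 2 := by
              rw [pv_safe_pos _ _ (by positivity), pv_mod_pos _ _ (by positivity)]
              apply Int.emod_eq_of_lt (by omega)
              rw [show k.toNat = (k - 1).toNat + 1 by omega, pow_succ]
              omega
            simp only [if_neg hx, hval]
            rw [if_neg (show ¬ x * 2 = -1 by omega),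
                show (t + 1).toNat = t.toNat + 1 by omega, pow_succ]
            ring_nf
      · -- c odd: both return -1
        have hA : solve_quadratic_mod2k a b c k = -1 := by
          conv_lhs => rw [solve_quadratic_mod2k]
          rw [dif_neg (show ¬ k ≤ 0 by omega), dif_neg (show ¬ k = 1 by omega), if_pos hcm,
              if_pos hc]
        rw [hA]
        conv_lhs => rw [sqAltLoop]
        rw [dif_pos hS, if_pos (show PySem.Int.mod c 2 ≠ 0 by rw [hc]; norm_num), if_pos rfl]
    · rw [show (n + 1 : Nat) = n + 1 from rfl] at hn
      by_cases h1 : k = 1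
      · -- base case k = 1
        have hA : solve_quadratic_mod2k a b c k =
            (if PySem.Int.mod c 2 = 0 then (0 : Int) else -1) := by
          conv_lhs => rw [solve_quadratic_mod2k]
          rw [dif_neg (show ¬ k ≤ 0 by omega), dif_pos h1]
        rw [hA]
        conv_lhs => rw [sqAltLoop]
        rw [dif_neg hS, if_pos h1]
        rcases pv_mod_two_cases c with hc | hc
        · rw [if_pos hc, if_neg (show ¬ (0 : Int) = -1 by norm_num), zero_mul,
              pv_mod_pos _ _ (by positivity), Int.zero_emod]
        · rw [if_neg (show ¬ PySem.Int.mod c 2 = 0 by rw [hc]; norm_num), if_pos rfl]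
      · -- core: k ≥ 2 and not both a, b even
        have hne : ¬ (PySem.Int.mod a 2 = PySem.Int.mod b 2 ∧ PySem.Int.mod b 2 = 0) := by
          intro hab
          exact hS ⟨by omega, hab.1.trans hab.2, hab.2⟩
        by_cases hae : PySem.Int.mod a 2 = 0
        · -- linear case: b odd, modular inverse
          have hbo : PySem.Int.mod b 2 ≠ 0 := fun hb => hS ⟨by omega, hae, hb⟩
          have hA : solve_quadratic_mod2k a b c k =
              safe_mod (-c * pyPowInvMod b (2 ^ k.toNat)) (2 ^ k.toNat) := by
            conv_lhs => rw [solve_quadratic_mod2k]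
            rw [dif_neg (show ¬ k ≤ 0 by omega), dif_neg h1, if_neg hne, if_pos hae, if_neg hbo]
          rw [hA]
          conv_lhs => rw [sqAltLoop]
          rw [dif_neg hS, if_neg h1, pv_zetaB, if_pos hae, pv_safe_pos _ _ (by positivity)]
          have hx0 := (pv_mod_bounds (-c * pyPowInvMod b (2 ^ k.toNat)) (2 ^ k.toNat)
            (by positivity)).1
          rw [if_neg (by omega)]
        · -- odd-a Hensel lifting loop
          have hA : solve_quadratic_mod2k a b c k =
              (PySem.List.pyRange 0 k 1).foldl (fun x i =>
                let px := safe_mod (a * x * x + b * x + c) (2 ^ (i + 1).toNat)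
                if px ≠ 0 ∧ safe_mod (a * 2 * x + b) 2 = 1 then
                  safe_mod (x + 2 ^ i.toNat) (2 ^ k.toNat)
                else x) 0 := by
            conv_lhs => rw [solve_quadratic_mod2k]
            rw [dif_neg (show ¬ k ≤ 0 by omega), dif_neg h1, if_neg hne, if_neg hae]
          rw [hA]
          conv_lhs => rw [sqAltLoop]
          rw [dif_neg hS, if_neg h1, pv_zetaB, if_neg hae, pv_zetaC]
          have hf := pv_fold a b c k k.toNat (le_refl _)
          rw [show ((k.toNat : Nat) : Int) = k by omega] at hf
          obtain ⟨heq, h0, hlt⟩ := hf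
          rw [← heq, if_neg (by omega)]

-- ===== VERDICT (by name: the statement is the Claim_ definition above) =====
theorem solve_quadratic_mod2k_spec : Claim_equal_solve_quadratic_mod2k := by
  intro a b c k _
  unfold Spec_solve_quadratic_mod2k solve_quadratic_mod2k_alt
  by_cases h0 : k ≤ 0
  · rw [if_pos h0]
    conv_lhs => rw [solve_quadratic_mod2k]
    rw [dif_pos h0]
  · rw [if_neg h0,
        pv_gen k.toNat a b c k 0 k rfl (by omega) (by omega) (by omega)]
    rcases pv_range a b c k (by omega) with hr | ⟨hr0, hrlt⟩
    · rw [if_pos hr, hr]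
    · rw [if_neg (by omega), show (0 : Int).toNat = 0 from rfl, pow_zero, mul_one,
          pv_mod_pos _ _ (by positivity), Int.emod_eq_of_lt hr0 hrlt]
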